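-- pv_equiv track=rewrite | github.com/linhdvu14/cp-sols | sols/Google/KickStart/2020/2020_C/A_Countdown.py | solve
-- ===== SOURCE A (Python) =====
-- def solve(N,K,nums):
-- 	indices = [i for i,num in enumerate(nums) if num==1]
-- 	res = 0
-- 	for i in indices:
-- 		valid = True
-- 		for k in range(K):
-- 			if not valid: break
-- 			if k > i: valid = False
-- 			if nums[i-k] != 1+k: valid = False
-- 		if valid: res += 1
--
-- 	return res
-- ===== SOURCE B (Python) =====
-- def solve(N, K, nums):
--     # Single pass: track the length of the current consecutive-descending-by-1 run.
--     res = 0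
--     run = 0
--     prev = 0
--     for x in nums:
--         run = run + 1 if (run > 0 and x == prev - 1) else 1
--         if x == 1 and run >= K:
--             res += 1
--         prev = x
--     return res
-- ===== Notes on version B (the rewrite author's own statement) =====
-- stated objective: alternative
-- what changed: Replaced the per-1 backward window re-check (for every index holding 1, rescan up to K previous elements) by a single left-to-right pass that maintains the length of the current consecutive descending-by-1 run and counts a hit whenever the element is 1 and the run has reached K.
import Mathlib
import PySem

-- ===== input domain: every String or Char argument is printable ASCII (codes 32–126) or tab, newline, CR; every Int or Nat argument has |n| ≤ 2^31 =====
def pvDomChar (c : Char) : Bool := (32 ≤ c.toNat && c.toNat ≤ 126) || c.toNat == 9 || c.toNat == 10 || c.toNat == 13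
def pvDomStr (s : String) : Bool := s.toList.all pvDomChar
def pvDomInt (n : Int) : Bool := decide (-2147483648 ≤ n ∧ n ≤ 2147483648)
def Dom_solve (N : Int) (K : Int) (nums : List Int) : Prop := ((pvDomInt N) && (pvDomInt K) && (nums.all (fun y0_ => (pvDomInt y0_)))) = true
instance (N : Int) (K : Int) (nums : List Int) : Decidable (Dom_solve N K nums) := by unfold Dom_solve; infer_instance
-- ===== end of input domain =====

-- B replaces A's per-1 backward window rescan by a single pass tracking the current
-- consecutive descending-by-1 run length (objective: alternative algorithm).

-- ===== PORT A =====
-- inner 'for k in range(K): if not valid: break; …' loop of A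
def loopA (nums : List Int) (i : Int) (kmax : Nat) (k : Nat) (valid : Bool) : Bool :=
  if h : k < kmax then
    if !valid then valid
    else
      let v1 := if (k : Int) > i then false else valid
      let v2 := if PySem.List.pyGet? nums (i - (k : Int)) ≠ some (1 + (k : Int)) then false else v1
      loopA nums i kmax (k + 1) v2
  else valid
termination_by kmax - k

def solve (N : Int) (K : Int) (nums : List Int) : Int :=
  let indices := ((PySem.List.enumerate nums 0).filter (fun p => p.2 == 1)).map (fun p => p.1)
  indices.foldl (fun res i => if loopA nums i K.toNat 0 true then res + 1 else res) 0

-- ===== PORT B =====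
def stepB (K : Int) (s : Int × Int × Int) (x : Int) : Int × Int × Int :=
  let run := if s.2.1 > 0 && x == s.2.2 - 1 then s.2.1 + 1 else 1
  let res := if x == 1 && decide (K ≤ run) then s.1 + 1 else s.1
  (res, run, x)

def solve_alt (N : Int) (K : Int) (nums : List Int) : Int :=
  (nums.foldl (stepB K) (0, 0, 0)).1

-- ===== PRECONDITION & SPEC =====
def Spec_solve (N : Int) (K : Int) (nums : List Int) (out : Int) : Prop := out = solve_alt N K nums
instance (N : Int) (K : Int) (nums : List Int) (out : Int) : Decidable (Spec_solve N K nums out) := by unfold Spec_solve; infer_instance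

-- ===== CLAIM (what is proved, stated in full; the proofs are below) =====
def Claim_equal_solve : Prop := ∀ (N : Int) (K : Int) (nums : List Int), Dom_solve N K nums → Spec_solve N K nums (solve N K nums)

-- ===== LEMMAS AND PROOFS =====

-- reference predicate: index i of nums ends a countdown K..1
def condG (K : Int) (nums : List Int) (i : Nat) : Bool :=
  (nums.getD i 0 == 1) &&
    decide (∀ j : Nat, j < K.toNat → j ≤ i ∧ nums.getD (i - j) 0 = 1 + (j : Int))

def cnt (K : Int) (nums : List Int) : Int :=
  ((List.range nums.length).countP (condG K nums) : Int)

theorem loopA_false (nums : List Int) (i : Int) (kmax k : Nat) :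
    loopA nums i kmax k false = false := by
  unfold loopA
  split
  · simp
  · rfl

theorem loopA_step (nums : List Int) (i : Int) (kmax k : Nat) (h : k < kmax) :
    loopA nums i kmax k true = loopA nums i kmax (k + 1)
      (if PySem.List.pyGet? nums (i - (k : Int)) ≠ some (1 + (k : Int)) then false
       else if (k : Int) > i then false else true) := by
  conv_lhs => rw [loopA]
  simp only [dif_pos h, Bool.not_true, Bool.false_eq_true, if_false]

theorem loopA_char (nums : List Int) (i : Nat) (hi : i < nums.length) (kmax k : Nat) :
    loopA nums (i : Int) kmax k true
      = decide (∀ j : Nat, k ≤ j → j < kmax → j ≤ i ∧ nums.getD (i - j) 0 = 1 + (j : Int)) := by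
  by_cases h : k < kmax
  · rw [loopA_step nums i kmax k h]
    by_cases hki : k ≤ i
    · have hcast : (i : Int) - (k : Int) = ((i - k : Nat) : Int) := by omega
      have hget : PySem.List.pyGet? nums ((i : Int) - (k : Int)) = some (nums[i - k]'(by omega)) := by
        rw [hcast, PySem.List.pyGet?_natCast]
        exact List.getElem?_eq_getElem (by omega)
      have hgd : nums.getD (i - k) 0 = nums[i - k]'(by omega) := List.getD_eq_getElem _ _ (by omega)
      have hni : ¬ ((k : Int) > (i : Int)) := by exact_mod_cast not_lt.mpr hki
      by_cases hval : nums.getD (i - k) 0 = 1 + (k : Int)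
      · rw [if_neg (by rw [hget]; simp only [ne_eq, Option.some.injEq, not_not]; rw [← hgd]; exact hval), if_neg hni,
          loopA_char nums i hi kmax (k + 1), decide_eq_decide]
        constructor
        · intro hall j hj1 hj2
          rcases Nat.eq_or_lt_of_le hj1 with rfl | hlt
          · exact ⟨hki, hval⟩
          · exact hall j hlt hj2
        · intro hall j hj1 hj2
          exact hall j (by omega) hj2
      · rw [if_pos (by rw [hget]; simp only [ne_eq, Option.some.injEq]; rw [← hgd]; exact hval), loopA_false]
        symm
        rw [decide_eq_false_iff_not]
        intro hall
        exact hval (hall k le_rfl h).2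
    · have hgt : ((k : Int) > (i : Int)) := by exact_mod_cast Nat.lt_of_not_le hki
      rw [if_pos hgt]
      have hc : (if PySem.List.pyGet? nums ((i:Int) - (k:Int)) ≠ some (1 + (k : Int)) then false else false) = false := by
        split <;> rfl
      rw [hc, loopA_false]
      symm
      rw [decide_eq_false_iff_not]
      intro hall
      exact hki (hall k le_rfl h).1
  · rw [loopA, dif_neg h]
    symm
    rw [decide_eq_true_iff]
    intro j hj1 hj2
    omega
termination_by kmax - k

theorem foldl_count (p : Int → Bool) (l : List Int) (init : Int) :
    l.foldl (fun res i => if p i then res + 1 else res) init = init + (l.countP p : Int) := by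
  induction l generalizing init with
  | nil => simp
  | cons x xs ih =>
    simp only [List.foldl_cons, List.countP_cons, ih]
    by_cases hx : p x <;> simp [hx] <;> push_cast <;> ring

-- ===== A-side: solve = cnt =====

theorem solve_eq_cnt (N K : Int) (nums : List Int) : solve N K nums = cnt K nums := by
  unfold solve cnt
  rw [foldl_count]
  rw [List.countP_map, List.countP_filter,
      PySem.List.enumerate_eq_map_pyRange nums 0, List.countP_map,
      show PySem.List.len nums = ((nums.length : Nat) : Int) by simp [PySem.List.len],
      PySem.List.pyRange_zero_natCast nums.length, List.countP_map]
  simp only [zero_add]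
  congr 1
  have hb : ∀ i ∈ List.range nums.length,
      (((fun a => ((fun i => loopA nums i K.toNat 0 true) ∘ fun p => p.1) a && a.2 == 1) ∘
          fun j => ((j : Int), PySem.List.pyGetD nums (j : Int) 0)) ∘ fun k : Nat => ((k : Int))) i
        = condG K nums i := by
    intro i hi
    have hi' : i < nums.length := List.mem_range.mp hi
    simp only [Function.comp_apply]
    rw [PySem.List.pyGetD_natCast]
    rw [loopA_char nums i hi' K.toNat 0, condG]
    by_cases h1 : nums.getD i 0 = 1
    · simp only [h1, beq_self_eq_true, Bool.true_and, Bool.and_true]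
      rw [decide_eq_decide]
      constructor
      · intro hall j hj; exact hall j (Nat.zero_le j) hj
      · intro hall j _ hj; exact hall j hj
    · have h2 : (nums.getD i 0 == 1) = false := beq_eq_false_iff_ne.mpr h1
      rw [h2, Bool.and_false, Bool.false_and]
  apply List.countP_congr
  intro i hi
  rw [hb i hi]

-- ===== B-side: solve_alt = cnt =====

theorem getD_last (p : List Int) :
    p.getD (p.length - 1) 0 = p.getLastD 0 := by
  rw [List.getLastD_eq_getLast?, List.getLast?_eq_getElem?, List.getD_eq_getElem?_getD]

theorem condG_append (K : Int) (p : List Int) (x : Int) (i : Nat) (hi : i < p.length) :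
    condG K (p ++ [x]) i = condG K p i := by
  unfold condG
  have hg : ∀ j : Nat, j ≤ i → (p ++ [x]).getD j 0 = p.getD j 0 := by
    intro j hj
    rw [List.getD_append _ _ _ _ (by omega)]
  rw [hg i (le_refl i)]
  congr 1
  rw [decide_eq_decide]
  constructor
  · intro hall j hj
    obtain ⟨h1, h2⟩ := hall j hj
    exact ⟨h1, by rwa [hg (i - j) (by omega)] at h2⟩
  · intro hall j hj
    obtain ⟨h1, h2⟩ := hall j hj
    exact ⟨h1, by rwa [hg (i - j) (by omega)]⟩

theorem cnt_append (K : Int) (p : List Int) (x : Int) :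
    cnt K (p ++ [x]) = cnt K p + (if condG K (p ++ [x]) p.length then 1 else 0) := by
  unfold cnt
  rw [show (p ++ [x]).length = p.length + 1 by simp, List.range_succ, List.countP_append]
  have hloc : (List.range p.length).countP (condG K (p ++ [x]))
      = (List.range p.length).countP (condG K p) := by
    apply List.countP_congr
    intro i hi
    rw [condG_append K p x i (List.mem_range.mp hi)]
  rw [hloc]
  by_cases hc : condG K (p ++ [x]) p.length = true <;> simp [hc] <;> push_cast <;> ring

theorem getD_concat_length (p : List Int) (x : Int) :
    (p ++ [x]).getD p.length 0 = x := by
  rw [List.getD_eq_getElem?_getD, List.getElem?_concat_length]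
  rfl

-- characterisation of the final run length r: r ≥ m iff the last m elements count up backwards
def RunChar (p : List Int) (x : Int) (r : Int) : Prop :=
  ∀ m : Nat, 1 ≤ m →
    ((m : Int) ≤ r ↔ m ≤ p.length + 1 ∧
      ∀ k : Nat, k < m → (p ++ [x]).getD (p.length - k) 0 = x + (k : Int))

theorem condG_last (K : Int) (p : List Int) (x r : Int) (hr : 1 ≤ r)
    (hchar : RunChar p x r) :
    condG K (p ++ [x]) p.length = (x == 1 && decide (K ≤ r)) := by
  unfold condG
  rw [getD_concat_length]
  by_cases hx1 : x = 1
  · subst hx1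
    simp only [beq_self_eq_true, Bool.true_and]
    rw [decide_eq_decide]
    constructor
    · intro hall
      by_cases hK : K ≤ 0
      · omega
      · have h1 : ((K.toNat : Nat) : Int) ≤ r := by
          apply (hchar K.toNat (by omega)).mpr
          refine ⟨?_, ?_⟩
          · have := (hall (K.toNat - 1) (by omega)).1
            omega
          · intro k hk
            exact (hall k hk).2
        omega
    · intro hK j hj
      have hK1 : 1 ≤ K.toNat := by omega
      obtain ⟨hle, hall⟩ := (hchar K.toNat hK1).mp (by omega)
      exact ⟨by omega, hall j hj⟩
  · have h2 : (x == 1) = false := beq_eq_false_iff_ne.mpr hx1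
    rw [h2, Bool.false_and, Bool.false_and]

theorem stateB_inv (K : Int) (nums : List Int) :
    (nums.foldl (stepB K) (0, 0, 0)).2.2 = nums.getLastD 0
    ∧ (0 : Int) ≤ (nums.foldl (stepB K) (0, 0, 0)).2.1
    ∧ ((nums.foldl (stepB K) (0, 0, 0)).2.1 = 0 ↔ nums = [])
    ∧ (∀ m : Nat, 1 ≤ m →
        ((m : Int) ≤ (nums.foldl (stepB K) (0, 0, 0)).2.1 ↔
          m ≤ nums.length ∧
            ∀ k : Nat, k < m → nums.getD (nums.length - 1 - k) 0 = nums.getLastD 0 + (k : Int)))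
    ∧ (nums.foldl (stepB K) (0, 0, 0)).1 = cnt K nums := by
  induction nums using List.reverseRecOn with
  | nil =>
    refine ⟨rfl, le_refl 0, by simp, ?_, by simp [cnt]⟩
    intro m hm
    constructor
    · intro h; exfalso; simp only [List.foldl_nil] at h; omega
    · rintro ⟨h, -⟩; simp at h; omega
  | append_singleton p x ih =>
    obtain ⟨hprev, hnn, hzero, hM, hres⟩ := ih
    rw [List.foldl_append, List.foldl_cons, List.foldl_nil]
    set s := p.foldl (stepB K) (0, 0, 0) with hs
    set L := p.length with hL
    have hlen : (p ++ [x]).length = L + 1 := by simp [hL]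
    have hlast : (p ++ [x]).getLastD 0 = x := by
      rw [List.getLastD_eq_getLast?, List.getLast?_concat]
      rfl
    have hgetL : (p ++ [x]).getD L 0 = x := getD_concat_length p x
    have hgetlt : ∀ j : Nat, j < L → (p ++ [x]).getD j 0 = p.getD j 0 := by
      intro j hj
      rw [List.getD_append _ _ _ _ (by omega)]
    have key : ∃ r' : Int, stepB K s x = (if x == 1 && decide (K ≤ r') then s.1 + 1 else s.1, r', x)
        ∧ 1 ≤ r' ∧ RunChar p x r' := by
      by_cases hp : p = []
      · -- first element processed: run becomes 1
        refine ⟨1, ?_, le_refl 1, ?_⟩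
        · have hrun0 : s.2.1 = 0 := hzero.mpr hp
          unfold stepB
          rw [hrun0]
          norm_num
        · intro m hm
          subst hp
          constructor
          · intro h
            have hm1 : m = 1 := by omega
            subst hm1
            refine ⟨by simp, ?_⟩
            intro k hk
            have hk0 : k = 0 := by omega
            subst hk0
            simpa using hgetL
          · rintro ⟨h1, -⟩
            simp only [List.length_nil] at h1
            omega
      · have hL1 : 1 ≤ L := by
          have := List.length_pos_iff.mpr hp
          omega
        have hrunpos : (1 : Int) ≤ s.2.1 := by
          rcases lt_or_eq_of_le hnn with h | h
          · omega
          · exact absurd (hzero.mp h.symm) hp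
        by_cases hx : x = s.2.2 - 1
        · -- run extends
          refine ⟨s.2.1 + 1, ?_, by omega, ?_⟩
          · unfold stepB
            rw [if_pos (by simp [hx]; omega)]
          · intro m hm
            rcases Nat.eq_or_lt_of_le hm with rfl | hm2
            · constructor
              · intro _
                refine ⟨by omega, ?_⟩
                intro k hk
                have hk0 : k = 0 := by omega
                subst hk0
                simpa using hgetL
              · intro _
                omega
            · have hM1 := hM (m - 1) (by omega)
              constructor
              · intro h
                obtain ⟨ha, hb⟩ := hM1.mp (by omega)
                refine ⟨by omega, ?_⟩
                intro k hk
                rcases Nat.eq_zero_or_pos k with rfl | hk0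
                · simpa using hgetL
                · rw [hgetlt _ (by omega), show L - k = L - 1 - (k - 1) by omega]
                  have h1 := hb (k - 1) (by omega)
                  rw [h1, ← hprev, hx]
                  have : ((k - 1 : Nat) : Int) = (k : Int) - 1 := by omega
                  rw [this]
                  ring
              · rintro ⟨ha, hb⟩
                have h1 : ((m - 1 : Nat) : Int) ≤ s.2.1 := by
                  apply hM1.mpr
                  refine ⟨by omega, ?_⟩
                  intro k hk
                  have hk1 := hb (k + 1) (by omega)
                  rw [hgetlt _ (by omega), show L - (k + 1) = L - 1 - k by omega] at hk1
                  rw [hk1, ← hprev, hx]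
                  push_cast
                  ring
                omega
        · -- run resets to 1
          refine ⟨1, ?_, le_refl 1, ?_⟩
          · unfold stepB
            rw [if_neg (by simp [hx])]
          · intro m hm
            rcases Nat.eq_or_lt_of_le hm with rfl | hm2
            · constructor
              · intro _
                refine ⟨by omega, ?_⟩
                intro k hk
                have hk0 : k = 0 := by omega
                subst hk0
                simpa using hgetL
              · intro _
                omega
            · constructor
              · intro h
                exfalso
                omega
              · rintro ⟨ha, hb⟩
                exfalso
                have h1 := hb 1 (by omega)
                rw [hgetlt _ (by omega), show L - 1 = p.length - 1 from rfl, getD_last, ← hprev] at h1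
                exact hx (by omega)
    obtain ⟨r', hstep, hr', hchar⟩ := key
    have e1 : (stepB K s x).1 = if x == 1 && decide (K ≤ r') then s.1 + 1 else s.1 := by rw [hstep]
    have e2 : (stepB K s x).2.1 = r' := by rw [hstep]
    have e3 : (stepB K s x).2.2 = x := by rw [hstep]
    refine ⟨?_, ?_, ?_, ?_, ?_⟩
    · rw [e3, hlast]
    · rw [e2]; omega
    · rw [e2]
      constructor
      · intro h
        exfalso
        omega
      · intro h
        exact absurd h (by simp)
    · intro m hm
      rw [e2]
      simp only [hlen, hlast, Nat.add_sub_cancel]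
      exact hchar m hm
    · rw [e1, cnt_append, condG_last K p x r' hr' hchar, hres]
      split <;> omega

theorem solve_alt_eq_cnt (N K : Int) (nums : List Int) : solve_alt N K nums = cnt K nums := by
  unfold solve_alt
  exact (stateB_inv K nums).2.2.2.2

-- ===== VERDICT (by name: the statement is the Claim_ definition above) =====
theorem solve_spec : Claim_equal_solve := by
  intro N K nums _
  unfold Spec_solve
  rw [solve_eq_cnt, solve_alt_eq_cnt]
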